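-- pv_equiv track=rewrite | github.com/tomcounsell/ai | scripts/refresh_test_baseline.py | aggregate_outcomes
-- ===== SOURCE A (Python) =====
-- from collections.abc import Iterable
--
-- def aggregate_outcomes(
--     per_run_outcomes: Iterable[dict[str, str]],
-- ) -> dict[str, list[str]]:
--     """Combine per-run ``{node_id: outcome}`` maps into ``{node_id: [outcome, ...]}``.
--
--     Runs that discover a test for the first time may miss it in earlier runs.
--     Runs where a test never appears (e.g. never collected, or run was discarded
--     entirely) are treated as absent for that node -- only the runs that
--     actually observed the node are recorded.  This matches the intuition
--     "classify from the runs you have".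
--     """
--     aggregated: dict[str, list[str]] = {}
--     for run in per_run_outcomes:
--         for node_id, outcome in run.items():
--             aggregated.setdefault(node_id, []).append(outcome)
--     return aggregated
-- ===== SOURCE B (Python) =====
-- from collections.abc import Iterable
--
--
-- def aggregate_outcomes(
--     per_run_outcomes: Iterable[dict[str, str]],
-- ) -> dict[str, list[str]]:
--     """Flatten, compute first-occurrence key order, then gather per key."""
--     flat = [item for run in per_run_outcomes for item in run.items()]
--     order = list(dict.fromkeys(nid for nid, _ in flat))
--     return {nid: [out for n, out in flat if n == nid] for nid in order}
-- ===== Notes on version B (the rewrite author's own statement) =====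
-- stated objective: alternative
-- what changed: Replaced the one-pass dict/setdefault accumulation with a flatten + first-occurrence key dedup + per-key gathering pass over the flattened (node_id, outcome) list.
import Mathlib
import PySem

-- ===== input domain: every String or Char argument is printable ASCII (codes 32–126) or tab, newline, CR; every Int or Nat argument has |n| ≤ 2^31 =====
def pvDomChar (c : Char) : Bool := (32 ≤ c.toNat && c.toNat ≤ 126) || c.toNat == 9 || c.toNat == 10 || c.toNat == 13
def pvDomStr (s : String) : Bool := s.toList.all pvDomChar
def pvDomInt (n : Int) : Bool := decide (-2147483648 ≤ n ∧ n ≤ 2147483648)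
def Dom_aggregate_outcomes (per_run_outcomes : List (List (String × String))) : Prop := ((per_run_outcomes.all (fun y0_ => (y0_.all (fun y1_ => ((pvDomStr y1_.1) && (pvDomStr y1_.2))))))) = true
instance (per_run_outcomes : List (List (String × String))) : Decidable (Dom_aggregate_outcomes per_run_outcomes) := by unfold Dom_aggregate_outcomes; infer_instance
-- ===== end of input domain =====

-- B groups by flattening, ordered key dedup and a per-key gathering pass instead of A's
-- single-pass setdefault accumulation; alternative decomposition, not claimed faster.

-- ===== PORT A =====
-- aggregated.setdefault(node_id, []).append(outcome) = aggregated.modify node_id [] (· ++ [outcome])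
def aggregate_outcomes (per_run_outcomes : List (List (String × String))) : List (String × List String) :=
  (per_run_outcomes.foldl
    (fun aggregated run =>
      run.foldl (fun aggregated p => aggregated.modify p.1 [] (· ++ [p.2])) aggregated)
    (PySem.Dict.empty : PySem.Dict String (List String))).items

-- ===== PORT B =====
def aggregate_outcomes_alt (per_run_outcomes : List (List (String × String))) : List (String × List String) :=
  let flat := per_run_outcomes.flatMap (fun run => run)
  let order := PySem.List.dedup (flat.map (fun p => p.1))
  order.map (fun nid => (nid, (flat.filter (fun p => p.1 == nid)).map (fun p => p.2)))

-- ===== PRECONDITION & SPEC =====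
def Spec_aggregate_outcomes (per_run_outcomes : List (List (String × String))) (out : List (String × List String)) : Prop := out = aggregate_outcomes_alt per_run_outcomes
instance (per_run_outcomes : List (List (String × String))) (out : List (String × List String)) : Decidable (Spec_aggregate_outcomes per_run_outcomes out) := by unfold Spec_aggregate_outcomes; infer_instance

-- ===== CLAIM (what is proved, stated in full; the proofs are below) =====
def Claim_equal_aggregate_outcomes : Prop := ∀ (per_run_outcomes : List (List (String × String))), Dom_aggregate_outcomes per_run_outcomes → Spec_aggregate_outcomes per_run_outcomes (aggregate_outcomes per_run_outcomes)

-- ===== LEMMAS AND PROOFS =====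

-- A's nested loop is the single loop over the flattened pair list.
theorem pv_nested_foldl_eq_flat (runs : List (List (String × String)))
    (d : PySem.Dict String (List String)) :
    runs.foldl (fun agg run => run.foldl (fun agg p => agg.modify p.1 [] (· ++ [p.2])) agg) d
      = (runs.flatMap (fun run => run)).foldl (fun agg p => agg.modify p.1 [] (· ++ [p.2])) d := by
  induction runs generalizing d with
  | nil => rfl
  | cons r rs ih => simp [List.flatMap_cons, List.foldl_append, ih]

-- ===== VERDICT (by name: the statement is the Claim_ definition above) =====
theorem aggregate_outcomes_spec : Claim_equal_aggregate_outcomes := by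
  intro runs _
  show aggregate_outcomes runs = aggregate_outcomes_alt runs
  unfold aggregate_outcomes aggregate_outcomes_alt
  rw [pv_nested_foldl_eq_flat]
  set flat := runs.flatMap (fun run => run) with hflat
  set d := flat.foldl (fun agg p => agg.modify p.1 [] (· ++ [p.2]))
      (PySem.Dict.empty : PySem.Dict String (List String)) with hd
  have hnd : d.keys.Nodup := by
    rw [hd]
    exact PySem.Dict.nodup_keys_foldl_modify_key flat (fun p => p.1) []
      (fun _ p => (· ++ [p.2])) _ PySem.Dict.nodup_keys_empty
  have hkeys : d.keys = PySem.List.dedup (flat.map (fun p => p.1)) := by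
    rw [hd, PySem.Dict.keys_foldl_modify_key]
    simp [PySem.Dict.keys_empty, PySem.Set.update_nil_left]
  have hget : ∀ k, d.getD k [] = (flat.filter (fun p => p.1 == k)).map (fun p => p.2) := by
    intro k
    rw [hd, PySem.Dict.getD_foldl_modify_append]
    simp [PySem.Dict.getD_empty]
  rw [PySem.Dict.items_eq_map_keys d hnd [], hkeys]
  exact List.map_congr_left (fun k _ => by rw [hget k])
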